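-- pv_equiv track=rewrite | github.com/DanielGodoyGalindo/python-exercises | challenges/ball_trajectory.py | get_next_location
-- ===== SOURCE A (Python) =====
-- def get_next_location(matrix):
--     rows = len(matrix)
--     cols = len(matrix[0])
--
--     # 1. Find positions of 1 and 2
--     prev_row = prev_col = curr_row = curr_col = None
--
--     for r in range(rows):
--         for c in range(cols):
--             if matrix[r][c] == 1:
--                 prev_row, prev_col = r, c
--             elif matrix[r][c] == 2:
--                 curr_row, curr_col = r, c
--
--     # 2. Get movement direction
--     dy = curr_row - prev_row
--     dx = curr_col - prev_col
--
--     # 3. Get next position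
--     next_row = curr_row + dy
--     next_col = curr_col + dx
--
--     # 4. Bouncing walls
--     if next_row < 0 or next_row >= rows:
--         dy *= -1
--         next_row = curr_row + dy
--
--     if next_col < 0 or next_col >= cols:
--         dx *= -1
--         next_col = curr_col + dx
--
--     return [next_row, next_col]
-- ===== SOURCE B (Python) =====
-- def _find_last(matrix, value):
--     # scan from the bottom-right backwards; first hit is the last occurrence
--     for r in range(len(matrix) - 1, -1, -1):
--         row = matrix[r]
--         for c in range(len(row) - 1, -1, -1):
--             if row[c] == value:
--                 return r, c
--     return None, None
--
--
-- def get_next_location(matrix):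
--     rows, cols = len(matrix), len(matrix[0])
--     prev_row, prev_col = _find_last(matrix, 1)
--     curr_row, curr_col = _find_last(matrix, 2)
--     dy = curr_row - prev_row
--     dx = curr_col - prev_col
--     next_row = curr_row + dy
--     next_col = curr_col + dx
--     if not 0 <= next_row < rows:
--         next_row = curr_row - dy
--     if not 0 <= next_col < cols:
--         next_col = curr_col - dx
--     return [next_row, next_col]
-- ===== Notes on version B (the rewrite author's own statement) =====
-- stated objective: alternative
-- what changed: A makes one forward nested scan of the whole grid keeping last-seen positions of 1 and 2 in four variables; B finds each of the two positions by an independent backward scan from the bottom-right that early-returns on the first hit (the last occurrence).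
-- outside the precondition, e.g. on get_next_location([[0, 2], [1, 0], [0, 0, 1]]): A returns [1, 0], B returns [2, 0]
import Mathlib
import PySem

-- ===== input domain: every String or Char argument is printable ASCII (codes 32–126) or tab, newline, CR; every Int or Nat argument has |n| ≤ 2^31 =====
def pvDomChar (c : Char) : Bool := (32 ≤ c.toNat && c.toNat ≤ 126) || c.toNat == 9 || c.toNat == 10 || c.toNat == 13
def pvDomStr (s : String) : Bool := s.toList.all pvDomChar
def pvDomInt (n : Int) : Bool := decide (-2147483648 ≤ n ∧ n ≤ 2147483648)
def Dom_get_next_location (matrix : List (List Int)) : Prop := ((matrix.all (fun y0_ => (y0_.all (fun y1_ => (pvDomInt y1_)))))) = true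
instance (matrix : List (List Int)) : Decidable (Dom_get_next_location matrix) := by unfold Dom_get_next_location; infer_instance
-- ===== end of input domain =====

-- B replaces A's single forward full-grid scan (keeping "last seen" positions of 1 and 2 in
-- four variables) by two independent backward scans that early-return the first hit from the
-- bottom-right (= the last occurrence); objective: alternative decomposition.

-- ===== PORT A =====
def get_next_location (matrix : List (List Int)) : List Int :=
  let rows : Int := matrix.length
  let cols : Int := ((PySem.List.pyGetD matrix 0 []).length : Int)
  -- 1. Find positions of 1 and 2 (four Nones; the nested for-loops keep the last match)
  let st :=
    (PySem.List.pyRange 0 rows 1).foldl (fun st r =>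
      (PySem.List.pyRange 0 cols 1).foldl (fun st c =>
        let v := PySem.List.pyGetD (PySem.List.pyGetD matrix r []) c 0
        if v = 1 then ((some r, some c), st.2)
        else if v = 2 then (st.1, (some r, some c))
        else st) st)
      ((((none, none), (none, none)) : (Option Int × Option Int) × (Option Int × Option Int)))
  match st with
  | ((some prev_row, some prev_col), (some curr_row, some curr_col)) =>
    -- 2. movement direction
    let dy := curr_row - prev_row
    let dx := curr_col - prev_col
    -- 3. next position
    let next_row := curr_row + dy
    let next_col := curr_col + dx
    -- 4. bouncing walls (dy *= -1; next_row = curr_row + dy)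
    let next_row := if next_row < 0 ∨ next_row ≥ rows then curr_row + -dy else next_row
    let next_col := if next_col < 0 ∨ next_col ≥ cols then curr_col + -dx else next_col
    [next_row, next_col]
  | _ => []   -- a None among the four: Python raises TypeError; excluded by Pre_

-- ===== PORT B =====
-- helper find: first match scanning the reversed (bottom-right first) enumerated row
def pvFindColRev (cells : List (Int × Int)) (v : Int) : Option Int :=
  match cells with
  | [] => none
  | (c, x) :: rest => if x = v then some c else pvFindColRev rest v

-- helper find: rows scanned from the last upwards; early return on the first row with a hit
def pvFindCellRev (rws : List (Int × List Int)) (v : Int) : Option (Int × Int) :=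
  match rws with
  | [] => none
  | (r, row) :: rest =>
    match pvFindColRev (PySem.List.enumerate row 0).reverse v with
    | some c => some (r, c)
    | none => pvFindCellRev rest v

def get_next_location_alt (matrix : List (List Int)) : List Int :=
  let rows : Int := matrix.length
  let cols : Int := ((PySem.List.pyGetD matrix 0 []).length : Int)
  match pvFindCellRev (PySem.List.enumerate matrix 0).reverse 1 with
  | none => []   -- (None, None) unpacks fine but the subtraction raises; excluded by Pre_
  | some (prev_row, prev_col) =>
    match pvFindCellRev (PySem.List.enumerate matrix 0).reverse 2 with
    | none => []
    | some (curr_row, curr_col) =>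
      let dy := curr_row - prev_row
      let dx := curr_col - prev_col
      let next_row := if 0 ≤ curr_row + dy ∧ curr_row + dy < rows then curr_row + dy else curr_row - dy
      let next_col := if 0 ≤ curr_col + dx ∧ curr_col + dx < cols then curr_col + dx else curr_col - dx
      [next_row, next_col]

-- ===== PRECONDITION & SPEC =====
-- Pre_ excludes inputs where A raises (empty matrix: IndexError; missing 1 or 2 in the scanned
-- region, or a row shorter than the first: TypeError/IndexError) and, beyond that, ragged
-- matrices with rows longer than the first, on which A's truncation of every row to
-- len(matrix[0]) columns is an accident of its index loop (B scans full rows there).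
def Pre_get_next_location (matrix : List (List Int)) : Prop :=
  matrix ≠ [] ∧
  (∀ row ∈ matrix, row.length = (matrix.headD []).length) ∧
  (∃ row ∈ matrix, (1 : Int) ∈ row) ∧
  (∃ row ∈ matrix, (2 : Int) ∈ row)
instance (matrix : List (List Int)) : Decidable (Pre_get_next_location matrix) := by
  unfold Pre_get_next_location; infer_instance

def pvWitness_get_next_location : List (List Int) := [[1, 2], [0, 0]]

def Spec_get_next_location (matrix : List (List Int)) (out : List Int) : Prop := out = get_next_location_alt matrix
instance (matrix : List (List Int)) (out : List Int) : Decidable (Spec_get_next_location matrix out) := by unfold Spec_get_next_location; infer_instance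

-- ===== CLAIM (what is proved, stated in full; the proofs are below) =====
def Claim_equal_get_next_location : Prop := ∀ (matrix : List (List Int)), Dom_get_next_location matrix → Pre_get_next_location matrix → Spec_get_next_location matrix (get_next_location matrix)

-- ===== LEMMAS AND PROOFS =====

-- first-match scan over a snoc: check the tail element last
theorem pvFindColRev_append_singleton (l : List (Int × Int)) (c x v : Int) :
    pvFindColRev (l ++ [(c, x)]) v =
      match pvFindColRev l v with
      | some c' => some c'
      | none => if x = v then some c else none := by
  induction l with
  | nil => simp [pvFindColRev]
  | cons p rest ih =>
    obtain ⟨c', x'⟩ := p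
    by_cases h : x' = v <;> simp [pvFindColRev, h, ih]

theorem pvFindCellRev_append_singleton (l : List (Int × List Int)) (r : Int) (row : List Int) (v : Int) :
    pvFindCellRev (l ++ [(r, row)]) v =
      match pvFindCellRev l v with
      | some p => some p
      | none =>
        match pvFindColRev (PySem.List.enumerate row 0).reverse v with
        | some c => some (r, c)
        | none => none := by
  induction l with
  | nil => cases h : pvFindColRev (PySem.List.enumerate row 0).reverse v <;> simp [pvFindCellRev, h]
  | cons p rest ih =>
    obtain ⟨r', row'⟩ := p
    cases h : pvFindColRev (PySem.List.enumerate row' 0).reverse v <;> simp [pvFindCellRev, h, ih]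

-- A's inner loop over one enumerated row, in closed form via B's backward row scan
theorem inner_fold_eq (cells : List (Int × Int)) (r : Int)
    (st : (Option Int × Option Int) × (Option Int × Option Int)) :
    cells.foldl (fun st p =>
        if p.2 = 1 then ((some r, some p.1), st.2)
        else if p.2 = 2 then (st.1, (some r, some p.1))
        else st) st =
      ((match pvFindColRev cells.reverse 1 with
        | some c => (some r, some c)
        | none => st.1),
       (match pvFindColRev cells.reverse 2 with
        | some c => (some r, some c)
        | none => st.2)) := by
  induction cells generalizing st with
  | nil => simp [pvFindColRev]
  | cons p rest ih =>
    obtain ⟨c, x⟩ := p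
    rw [List.foldl_cons, ih]
    simp only [List.reverse_cons, pvFindColRev_append_singleton]
    rcases h1 : pvFindColRev rest.reverse 1 with _ | c1 <;>
      rcases h2 : pvFindColRev rest.reverse 2 with _ | c2 <;>
        by_cases hx1 : x = 1 <;> by_cases hx2 : x = 2 <;> simp_all

-- A's outer loop over the enumerated rows, in closed form via B's backward grid scan
theorem outer_fold_eq (rws : List (Int × List Int))
    (st : (Option Int × Option Int) × (Option Int × Option Int)) :
    rws.foldl (fun st q =>
        (PySem.List.enumerate q.2 0).foldl (fun st p =>
          if p.2 = 1 then ((some q.1, some p.1), st.2)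
          else if p.2 = 2 then (st.1, (some q.1, some p.1))
          else st) st) st =
      ((match pvFindCellRev rws.reverse 1 with
        | some p => (some p.1, some p.2)
        | none => st.1),
       (match pvFindCellRev rws.reverse 2 with
        | some p => (some p.1, some p.2)
        | none => st.2)) := by
  induction rws generalizing st with
  | nil => simp [pvFindCellRev]
  | cons q rest ih =>
    obtain ⟨r, row⟩ := q
    rw [List.foldl_cons, inner_fold_eq, ih]
    simp only [List.reverse_cons, pvFindCellRev_append_singleton]
    rcases h1 : pvFindCellRev rest.reverse 1 with _ | p1 <;>
      rcases h2 : pvFindCellRev rest.reverse 2 with _ | p2 <;>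
        rcases hc1 : pvFindColRev (PySem.List.enumerate row 0).reverse 1 with _ | c1 <;>
          rcases hc2 : pvFindColRev (PySem.List.enumerate row 0).reverse 2 with _ | c2 <;>
            simp_all

-- membership in an enumeration yields membership of the element
theorem snd_mem_of_mem_enumerate {α : Type} (xs : List α) (s : Int) (p : Int × α)
    (h : p ∈ PySem.List.enumerate xs s) : p.2 ∈ xs := by
  induction xs generalizing s with
  | nil => simp [PySem.List.enumerate] at h
  | cons y ys ih =>
    simp only [PySem.List.enumerate, List.mem_cons] at h
    rcases h with h | h
    · subst h; simp
    · exact List.mem_cons_of_mem _ (ih _ h)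

-- a backward first-match over a row finds something when the value is in the row
theorem pvFindColRev_isSome_of_mem (cells : List (Int × Int)) (v : Int)
    (h : ∃ c, (c, v) ∈ cells) : (pvFindColRev cells.reverse v).isSome := by
  induction cells with
  | nil => simp at h
  | cons p rst ih =>
    obtain ⟨c0, x0⟩ := p
    obtain ⟨c, hc⟩ := h
    simp only [List.reverse_cons, pvFindColRev_append_singleton]
    rcases hf : pvFindColRev rst.reverse v with _ | c'
    · rcases List.mem_cons.mp hc with h | h
      · simp only [Prod.mk.injEq] at h
        simp [← h.2]
      · have := ih ⟨c, h⟩; simp_all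
    · simp

theorem mem_enumerate_of_mem {α : Type} (xs : List α) (x : α) (s : Int)
    (h : x ∈ xs) : ∃ i, (i, x) ∈ PySem.List.enumerate xs s := by
  induction xs generalizing s with
  | nil => simp at h
  | cons y ys ih =>
    rcases List.mem_cons.mp h with h | h
    · exact ⟨s, by simp [PySem.List.enumerate, h]⟩
    · obtain ⟨i, hi⟩ := ih h (s := s + 1)
      exact ⟨i, by simp [PySem.List.enumerate, hi]⟩

theorem pvFindColRev_isSome (row : List Int) (v : Int) (hv : v ∈ row) :
    (pvFindColRev (PySem.List.enumerate row 0).reverse v).isSome := by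
  obtain ⟨i, hi⟩ := mem_enumerate_of_mem row v 0 hv
  exact pvFindColRev_isSome_of_mem _ v ⟨i, hi⟩

theorem pvFindCellRev_isSome (matrix : List (List Int)) (v : Int) (s : Int)
    (hv : ∃ row ∈ matrix, v ∈ row) :
    (pvFindCellRev (PySem.List.enumerate matrix s).reverse v).isSome := by
  induction matrix generalizing s with
  | nil => simp at hv
  | cons y ys ih =>
    simp only [PySem.List.enumerate, List.reverse_cons, pvFindCellRev_append_singleton]
    rcases hf : pvFindCellRev (PySem.List.enumerate ys (s + 1)).reverse v with _ | p
    · obtain ⟨row, hrow, hvrow⟩ := hv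
      rcases List.mem_cons.mp hrow with h | h
      · subst h
        rcases hc : pvFindColRev (PySem.List.enumerate row 0).reverse v with _ | c
        · have := pvFindColRev_isSome row v hvrow; simp_all
        · simp
      · have := ih (s := s + 1) ⟨row, h, hvrow⟩; simp_all
    · simp

-- A's whole nested pyRange fold, rewritten as B's two backward scans
theorem A_fold_eq (m : List (List Int)) (C : Int)
    (hrect : ∀ row ∈ m, (row.length : Int) = C)
    (st : (Option Int × Option Int) × (Option Int × Option Int)) :
    (PySem.List.pyRange 0 (m.length : Int) 1).foldl (fun st r =>
      (PySem.List.pyRange 0 C 1).foldl (fun st c =>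
        let v := PySem.List.pyGetD (PySem.List.pyGetD m r []) c 0
        if v = 1 then ((some r, some c), st.2)
        else if v = 2 then (st.1, (some r, some c))
        else st) st) st =
    ((match pvFindCellRev (PySem.List.enumerate m 0).reverse 1 with
      | some p => (some p.1, some p.2)
      | none => st.1),
     (match pvFindCellRev (PySem.List.enumerate m 0).reverse 2 with
      | some p => (some p.1, some p.2)
      | none => st.2)) := by
  have step1 : (PySem.List.pyRange 0 (m.length : Int) 1).foldl (fun st r =>
      (PySem.List.pyRange 0 C 1).foldl (fun st c =>
        let v := PySem.List.pyGetD (PySem.List.pyGetD m r []) c 0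
        if v = 1 then ((some r, some c), st.2)
        else if v = 2 then (st.1, (some r, some c))
        else st) st) st =
      (PySem.List.enumerate m 0).foldl (fun st q =>
        (PySem.List.pyRange 0 C 1).foldl (fun st c =>
          let v := PySem.List.pyGetD q.2 c 0
          if v = 1 then ((some q.1, some c), st.2)
          else if v = 2 then (st.1, (some q.1, some c))
          else st) st) st := by
    rw [PySem.List.enumerate_eq_map_pyRange m ([] : List Int), List.foldl_map]
    simp [PySem.List.len]
  rw [step1]
  rw [PySem.List.foldl_congr_mem _ _ (fun st q =>
        (PySem.List.enumerate q.2 0).foldl (fun st p =>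
          if p.2 = 1 then ((some q.1, some p.1), st.2)
          else if p.2 = 2 then (st.1, (some q.1, some p.1))
          else st) st) st ?_]
  · exact outer_fold_eq (PySem.List.enumerate m 0) st
  · intro acc q hq
    have hmem : q.2 ∈ m := snd_mem_of_mem_enumerate m 0 q hq
    have hlen : (q.2.length : Int) = C := hrect q.2 hmem
    beta_reduce
    rw [PySem.List.enumerate_eq_map_pyRange q.2 (0 : Int), List.foldl_map,
        ← hlen, show ((q.2.length : Int)) = PySem.List.len q.2 from rfl]

-- ===== VERDICT (by name: the statement is the Claim_ definition above) =====
theorem get_next_location_spec : Claim_equal_get_next_location := by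
  intro m _ hp
  obtain ⟨hne, hrect, h1, h2⟩ := hp
  obtain ⟨r0, rest, rfl⟩ : ∃ r0 rest, m = r0 :: rest := by
    cases m with
    | nil => exact absurd rfl hne
    | cons r0 rest => exact ⟨r0, rest, rfl⟩
  rcases hf1 : pvFindCellRev (PySem.List.enumerate (r0 :: rest) 0).reverse 1 with _ | p1
  · have := pvFindCellRev_isSome (r0 :: rest) 1 0 h1; simp_all
  rcases hf2 : pvFindCellRev (PySem.List.enumerate (r0 :: rest) 0).reverse 2 with _ | p2
  · have := pvFindCellRev_isSome (r0 :: rest) 2 0 h2; simp_all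
  obtain ⟨pr, pc⟩ := p1
  obtain ⟨cr, cc⟩ := p2
  have hrect' : ∀ row ∈ (r0 :: rest), (row.length : Int) = (r0.length : Int) := by
    intro row hrow
    have := hrect row hrow
    simp only [List.headD_cons] at this
    exact_mod_cast this
  unfold Spec_get_next_location get_next_location get_next_location_alt
  simp only [PySem.List.pyGetD_zero_cons]
  rw [A_fold_eq (r0 :: rest) (r0.length : Int) hrect', hf1, hf2]
  simp only [List.cons.injEq, and_true]
  refine ⟨?_, ?_⟩ <;> split_ifs <;> omega
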